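-- pv_equiv track=rewrite | github.com/TheAeryan/CRIP | Prácticas/Práctica 3/RSA.py | textotonumero
-- ===== SOURCE A (Python) =====
-- def textotonumero(tex):
--     sol = 0
--     pos = 1
--     for s in tex:
--         x = ord(s)
--         if (x>64 and x < 91):
--             sol = sol + pos*(x-64)
--             pos*=28
--         elif x == 209:
--             sol = sol + pos*27
--             pos*=28
--         elif x == 32:
--             pos*=28
--     return sol
-- ===== SOURCE B (Python) =====
-- def textotonumero(tex):
--     digits = []
--     for s in tex:
--         x = ord(s)
--         if 64 < x < 91:
--             digits.append(x - 64)
--         elif x == 209: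
--             digits.append(27)
--         elif x == 32:
--             digits.append(0)
--     sol = 0
--     for d in reversed(digits):
--         sol = sol * 28 + d
--     return sol
-- ===== Notes on version B (the rewrite author's own statement) =====
-- stated objective: alternative
-- what changed: Replaces the single interleaved loop carrying a running position multiplier with a map-then-fold decomposition: first collect the base-28 digits, then evaluate them with Horner's rule over the reversed digit list, eliminating the pos accumulator.
import Mathlib
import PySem

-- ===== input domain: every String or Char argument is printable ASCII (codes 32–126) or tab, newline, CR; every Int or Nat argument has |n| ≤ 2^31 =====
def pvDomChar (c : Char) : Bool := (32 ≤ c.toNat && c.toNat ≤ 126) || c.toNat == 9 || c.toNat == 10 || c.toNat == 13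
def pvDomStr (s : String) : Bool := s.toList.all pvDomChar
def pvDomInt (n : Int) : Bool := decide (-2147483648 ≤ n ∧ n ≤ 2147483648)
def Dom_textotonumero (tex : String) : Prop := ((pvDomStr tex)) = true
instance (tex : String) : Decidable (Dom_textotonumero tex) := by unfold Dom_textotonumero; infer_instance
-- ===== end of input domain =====

-- B replaces A's interleaved loop (running position multiplier) by a map-then-fold
-- decomposition: collect base-28 digits, then Horner over the reversed digit list.

-- ===== PORT A =====
-- one loop step of A: state (sol, pos), character s
def textotonumeroStep (st : Int × Int) (s : Char) : Int × Int :=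
  let x : Int := (s.toNat : Int)
  if x > 64 ∧ x < 91 then (st.1 + st.2 * (x - 64), st.2 * 28)
  else if x = 209 then (st.1 + st.2 * 27, st.2 * 28)
  else if x = 32 then (st.1, st.2 * 28)
  else st

def textotonumero (tex : String) : Int :=
  (tex.toList.foldl textotonumeroStep (0, 1)).1

-- ===== PORT B =====
-- digit of one character, or none if the character contributes nothing
def pvDigit? (s : Char) : Option Int :=
  let x : Int := (s.toNat : Int)
  if 64 < x ∧ x < 91 then some (x - 64)
  else if x = 209 then some 27
  else if x = 32 then some 0
  else none

def textotonumero_alt (tex : String) : Int :=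
  ((tex.toList.filterMap pvDigit?).reverse).foldl (fun sol d => sol * 28 + d) 0

-- ===== PRECONDITION & SPEC =====
def Spec_textotonumero (tex : String) (out : Int) : Prop := out = textotonumero_alt tex
instance (tex : String) (out : Int) : Decidable (Spec_textotonumero tex out) := by unfold Spec_textotonumero; infer_instance

-- ===== CLAIM (what is proved, stated in full; the proofs are below) =====
def Claim_equal_textotonumero : Prop := ∀ (tex : String), Dom_textotonumero tex → Spec_textotonumero tex (textotonumero tex)

-- ===== LEMMAS AND PROOFS =====

-- little-endian base-28 value of a digit list
def pvVal : List Int → Int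
  | [] => 0
  | d :: ds => d + 28 * pvVal ds

-- Horner over the reversed list computes the little-endian value
theorem pvHorner_eq_val (ds : List Int) :
    (ds.reverse).foldl (fun sol d => sol * 28 + d) 0 = pvVal ds := by
  induction ds with
  | nil => rfl
  | cons d ds ih =>
    simp [pvVal, List.foldl_append, ih]
    ring

-- A's loop invariant: first component of the fold is sol + pos * value of the digits
theorem pvFoldA (l : List Char) (sol pos : Int) :
    (l.foldl textotonumeroStep (sol, pos)).1
      = sol + pos * pvVal (l.filterMap pvDigit?) := by
  induction l generalizing sol pos with
  | nil => simp [pvVal]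
  | cons c l ih =>
    rw [List.foldl_cons, List.filterMap_cons]
    by_cases h1 : ((c.toNat : Int) > 64 ∧ (c.toNat : Int) < 91)
    · rw [show textotonumeroStep (sol, pos) c
          = (sol + pos * ((c.toNat : Int) - 64), pos * 28) from by
        simp only [textotonumeroStep]; split_ifs <;> first | rfl | (exfalso; omega),
        show pvDigit? c = some ((c.toNat : Int) - 64) from by
        simp only [pvDigit?]; split_ifs <;> first | rfl | (exfalso; omega)]
      simp [ih, pvVal]; ring
    · by_cases h2 : ((c.toNat : Int) = 209)
      · rw [show textotonumeroStep (sol, pos) c = (sol + pos * 27, pos * 28) from by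
          simp only [textotonumeroStep]; split_ifs <;> first | rfl | (exfalso; omega),
          show pvDigit? c = some 27 from by
          simp only [pvDigit?]; split_ifs <;> first | rfl | (exfalso; omega)]
        simp [ih, pvVal]; ring
      · by_cases h3 : ((c.toNat : Int) = 32)
        · rw [show textotonumeroStep (sol, pos) c = (sol, pos * 28) from by
            simp only [textotonumeroStep]; split_ifs <;> first | rfl | (exfalso; omega),
            show pvDigit? c = some 0 from by
            simp only [pvDigit?]; split_ifs <;> first | rfl | (exfalso; omega)]
          simp [ih, pvVal]; ring
        · rw [show textotonumeroStep (sol, pos) c = (sol, pos) from by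
            simp only [textotonumeroStep]; split_ifs <;> first | rfl | (exfalso; omega),
            show pvDigit? c = none from by
            simp only [pvDigit?]; split_ifs <;> first | rfl | (exfalso; omega)]
          simp [ih]

-- ===== VERDICT (by name: the statement is the Claim_ definition above) =====
theorem textotonumero_spec : Claim_equal_textotonumero := by
  intro tex _
  unfold Spec_textotonumero textotonumero textotonumero_alt
  rw [pvHorner_eq_val, pvFoldA]
  ring
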